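-- pv_equiv track=rewrite | github.com/123R3N321/PTC | legacy/cs1114and1134/leetcode1061.py | dfsMin
-- ===== SOURCE A (Python) =====
-- def dfsMin(start, adjLst, visited):
--     if start not in adjLst:
--         return start    #entire base case not needed actually because at minimum an elem has itself as next node
--     visited.add(start)
--     current = start #use current to track the smallest elem, but we still need starting point unchanged
--     for eachChild in adjLst[start]:
--         if eachChild not in visited:
--             candidate = dfsMin(eachChild, adjLst, visited)
--             current = min(candidate, current)
--     return current
-- ===== SOURCE B (Python) =====
-- def dfsMin(start, adjLst, visited):
--     # Iterative DFS: explicit stack of child iterators instead of recursion.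
--     # Same traversal order and the same visited-set mutations as the recursive version.
--     if start not in adjLst:
--         return start
--     visited.add(start)
--     best = start
--     stack = [iter(adjLst[start])]
--     while stack:
--         child = next(stack[-1], None)
--         if child is None:
--             stack.pop()
--         elif child not in visited:
--             if child < best:
--                 best = child
--             if child in adjLst:
--                 visited.add(child)
--                 stack.append(iter(adjLst[child]))
--     return best
-- ===== Notes on version B (the rewrite author's own statement) =====
-- stated objective: alternative
-- what changed: The recursive DFS (per-frame running minimum threaded up through return values) is replaced by an iterative DFS over an explicit stack of child iterators with one global running minimum.
import Mathlib
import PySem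

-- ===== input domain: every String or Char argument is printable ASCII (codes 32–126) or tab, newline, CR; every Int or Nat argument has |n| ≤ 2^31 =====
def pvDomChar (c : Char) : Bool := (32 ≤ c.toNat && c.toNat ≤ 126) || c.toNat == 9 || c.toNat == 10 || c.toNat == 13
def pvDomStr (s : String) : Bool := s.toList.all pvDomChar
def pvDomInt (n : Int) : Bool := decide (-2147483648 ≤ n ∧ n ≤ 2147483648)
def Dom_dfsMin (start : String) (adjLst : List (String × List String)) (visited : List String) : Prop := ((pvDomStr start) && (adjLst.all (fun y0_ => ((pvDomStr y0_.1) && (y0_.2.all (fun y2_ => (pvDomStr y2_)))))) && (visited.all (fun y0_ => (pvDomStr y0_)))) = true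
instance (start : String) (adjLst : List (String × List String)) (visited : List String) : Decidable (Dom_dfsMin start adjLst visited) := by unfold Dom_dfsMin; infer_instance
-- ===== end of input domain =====

-- B replaces A's recursive DFS by an iterative DFS over an explicit stack of child iterators
-- with a single global running minimum (objective: alternative decomposition, same cost).
-- Both A and B mutate `visited` in place in Python (the same adds in the same order);
-- the equivalence proved here is about the RETURN value.

-- ===== PORT A =====
-- A's recursion is ported with a fuel parameter that only guards Lean termination
-- (adjLst.length + 2 bounds the nesting depth: each nested call below the top either marks a
-- previously unvisited dictionary key or returns at once). goA is dfsMin's body, childA its for-loop.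
mutual
def goA (adj : List (String × List String)) : Nat → String → List String → String × List String
  | 0, s, vis => (s, vis)  -- fuel exhausted: never reached from dfsMin (see dfsMin_spec)
  | f + 1, s, vis =>
    if (PySem.Dict.contains ⟨adj⟩ s) = false then (s, vis)   -- if start not in adjLst: return start
    else childA adj f (PySem.Dict.getD ⟨adj⟩ s []) s (PySem.Set.add vis s)
termination_by f _ _ => (f, 0)

def childA (adj : List (String × List String)) : Nat → List String → String → List String → String × List String
  | _, [], cur, vis => (cur, vis)
  | f, c :: cs, cur, vis =>
    if PySem.Set.contains vis c then childA adj f cs cur vis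
    else
      let r := goA adj f c vis                               -- candidate = dfsMin(eachChild, …)
      childA adj f cs (min r.1 cur) r.2                      -- current = min(candidate, current)
termination_by f cs _ _ => (f, cs.length + 1)
end

def dfsMin (start : String) (adjLst : List (String × List String)) (visited : List String) : String :=
  (goA adjLst (adjLst.length + 2) start visited).1

-- ===== PORT B =====
-- helpers the port's termination measure cites:
def pvKeysLeft (adj : List (String × List String)) (vis : List String) : Nat :=
  ((PySem.List.dedup (adj.map Prod.fst)).filter (fun k => !(PySem.Set.contains vis k))).length

-- generic: a filter strictly shrinks when the predicate loses a satisfied element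
theorem pv_filter_len_lt {α : Type} {l : List α} {p q : α → Bool}
    (h : ∀ x, q x = true → p x = true) {c : α} (hc : c ∈ l)
    (hp : p c = true) (hq : q c = false) :
    (l.filter q).length < (l.filter p).length := by
  induction l with
  | nil => cases hc
  | cons x t ih =>
    rcases List.mem_cons.1 hc with rfl | hct
    · have hle : (t.filter q).length ≤ (t.filter p).length := by
        rw [← List.countP_eq_length_filter, ← List.countP_eq_length_filter]
        exact List.countP_mono_left (fun x _ hx => h x hx)
      simp [hp, hq]
      omega
    · have h' := ih hct
      by_cases hqx : q x = true
      · have hpx := h x hqx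
        simp [hqx, hpx]
        omega
      · rcases hpx : p x with _ | _ <;> simp [hqx, hpx] <;> omega

theorem pvKeysLeft_add_lt {adj : List (String × List String)} {vis : List String} {c : String}
    (hk : PySem.Dict.contains ⟨adj⟩ c = true) (hv : PySem.Set.contains vis c = false) :
    pvKeysLeft adj (PySem.Set.add vis c) < pvKeysLeft adj vis := by
  have hcv : c ∉ vis := by
    simpa [PySem.Set.contains, List.contains_eq_mem] using hv
  have hmem : c ∈ PySem.List.dedup (adj.map Prod.fst) := by
    rw [PySem.List.mem_dedup]
    simp only [PySem.Dict.contains, List.any_eq_true] at hk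
    rcases hk with ⟨pr, hpr, he⟩
    exact List.mem_map.2 ⟨pr, hpr, (beq_iff_eq.1 he)⟩
  have hadd : PySem.Set.add vis c = vis ++ [c] := by
    simp [PySem.Set.add, PySem.Set.contains, List.contains_eq_mem, hcv]
  unfold pvKeysLeft
  refine pv_filter_len_lt (fun x hx => ?_) hmem ?_ ?_
  · simp only [hadd, PySem.Set.contains, List.contains_eq_mem, Bool.not_eq_true',
      decide_eq_false_iff_not, List.mem_append] at hx ⊢
    exact fun hm => hx (Or.inl hm)
  · simp [PySem.Set.contains, List.contains_eq_mem, hcv]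
  · simp [hadd, PySem.Set.contains, List.contains_eq_mem]

-- Source B's while-loop: the stack holds one child iterator per open frame
-- (a Python iterator over adjLst[node] is this list consumed from the head; stack top = list head).
def loopB (adj : List (String × List String)) : List (List String) → String → List String → String
  | [], best, _ => best
  | [] :: stack, best, vis => loopB adj stack best vis                     -- iterator exhausted: stack.pop()
  | (c :: cs) :: stack, best, vis =>
    if PySem.Set.contains vis c then loopB adj (cs :: stack) best vis
    else
      let best' := if c < best then c else best
      if PySem.Dict.contains ⟨adj⟩ c then
        loopB adj ((PySem.Dict.getD ⟨adj⟩ c []) :: cs :: stack) best' (PySem.Set.add vis c)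
      else loopB adj (cs :: stack) best' vis
termination_by stack _ vis => (pvKeysLeft adj vis, (stack.map (fun fr => fr.length + 1)).sum)
decreasing_by
  · apply Prod.Lex.right; simp
  · apply Prod.Lex.right; simp
  · rename_i hv hk
    apply Prod.Lex.left
    exact pvKeysLeft_add_lt hk (by simpa using hv)
  · apply Prod.Lex.right; simp

def dfsMin_alt (start : String) (adjLst : List (String × List String)) (visited : List String) : String :=
  if (PySem.Dict.contains ⟨adjLst⟩ start) = false then start
  else loopB adjLst [PySem.Dict.getD ⟨adjLst⟩ start []] start (PySem.Set.add visited start)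

-- ===== PRECONDITION & SPEC =====
def Spec_dfsMin (start : String) (adjLst : List (String × List String)) (visited : List String) (out : String) : Prop := out = dfsMin_alt start adjLst visited
instance (start : String) (adjLst : List (String × List String)) (visited : List String) (out : String) : Decidable (Spec_dfsMin start adjLst visited out) := by unfold Spec_dfsMin; infer_instance

-- ===== CLAIM (what is proved, stated in full; the proofs are below) =====
def Claim_equal_dfsMin : Prop := ∀ (start : String) (adjLst : List (String × List String)) (visited : List String), Dom_dfsMin start adjLst visited → Spec_dfsMin start adjLst visited (dfsMin start adjLst visited)

-- ===== LEMMAS AND PROOFS =====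

-- (if c < best then c else best) is min
theorem pv_ite_min (c best : String) : (if c < best then c else best) = min c best := by
  rcases lt_trichotomy c best with h | rfl | h
  · simp [h, min_eq_left h.le]
  · simp
  · simp [not_lt_of_gt h, min_eq_right h.le]

-- the visited set only grows through A's recursion
theorem pv_mono (adj : List (String × List String)) :
    ∀ f ch cur vis x, x ∈ vis → x ∈ (childA adj f ch cur vis).2 := by
  intro f
  induction f with
  | zero =>
    intro ch
    induction ch with
    | nil => intro cur vis x hx; simpa [childA] using hx
    | cons c cs ih =>
      intro cur vis x hx
      by_cases hc : PySem.Set.contains vis c = true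
      · rw [childA, if_pos hc]; exact ih cur vis x hx
      · rw [childA, if_neg hc, goA]; exact ih _ vis x hx
  | succ n ihf =>
    intro ch
    induction ch with
    | nil => intro cur vis x hx; simpa [childA] using hx
    | cons c cs ih =>
      intro cur vis x hx
      by_cases hc : PySem.Set.contains vis c = true
      · rw [childA, if_pos hc]; exact ih cur vis x hx
      · rw [childA, if_neg hc]
        by_cases hk : PySem.Dict.contains (⟨adj⟩ : PySem.Dict String (List String)) c = false
        · rw [goA, if_pos hk]; exact ih _ vis x hx
        · rw [goA, if_neg hk]
          apply ih
          apply ihf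
          simp only [PySem.Set.add]
          split
          · exact hx
          · exact List.mem_append.2 (Or.inl hx)

theorem pv_keysLeft_mono {adj : List (String × List String)} {vis vis' : List String}
    (h : ∀ x, x ∈ vis → x ∈ vis') :
    pvKeysLeft adj vis' ≤ pvKeysLeft adj vis := by
  unfold pvKeysLeft
  rw [← List.countP_eq_length_filter, ← List.countP_eq_length_filter]
  apply List.countP_mono_left
  intro x _ hx
  simp only [PySem.Set.contains, List.contains_eq_mem, Bool.not_eq_true',
    decide_eq_false_iff_not] at hx ⊢
  exact fun hm => hx (h x hm)

-- min-linearity of A's child loop in its running minimum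
theorem pv_lin (adj : List (String × List String)) (f : Nat) :
    ∀ ch a cur vis, childA adj f ch (min a cur) vis =
      (min a (childA adj f ch cur vis).1, (childA adj f ch cur vis).2) := by
  intro ch
  induction ch with
  | nil => intro a cur vis; simp [childA]
  | cons c cs ih =>
    intro a cur vis
    by_cases hc : PySem.Set.contains vis c = true
    · rw [childA, if_pos hc, childA, if_pos hc]; exact ih a cur vis
    · rw [childA, if_neg hc, childA, if_neg hc]
      dsimp only
      rw [min_left_comm]
      exact ih a _ _

-- the simulation: B's stack machine runs A's child loop frame by frame
theorem pv_sim (adj : List (String × List String)) :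
    ∀ f ch stack best vis, pvKeysLeft adj vis + 1 ≤ f →
      loopB adj (ch :: stack) best vis =
        loopB adj stack (childA adj f ch best vis).1 (childA adj f ch best vis).2 := by
  intro f
  induction f with
  | zero => intro ch stack best vis hf; omega
  | succ n ihf =>
    intro ch
    induction ch with
    | nil => intro stack best vis hf; rw [loopB, childA]
    | cons c cs ih =>
      intro stack best vis hf
      by_cases hc : PySem.Set.contains vis c = true
      · rw [loopB, if_pos hc, childA, if_pos hc]
        exact ih stack best vis hf
      · by_cases hk : PySem.Dict.contains (⟨adj⟩ : PySem.Dict String (List String)) c = true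
        · -- child is a key: B pushes its iterator, A recurses into it
          have hlt : pvKeysLeft adj (PySem.Set.add vis c) < pvKeysLeft adj vis :=
            pvKeysLeft_add_lt hk (by simpa using hc)
          rw [loopB, if_neg hc, if_pos hk, pv_ite_min]
          rw [ihf (PySem.Dict.getD ⟨adj⟩ c []) (cs :: stack) (min c best)
              (PySem.Set.add vis c) (by omega)]
          rw [min_comm c best, pv_lin]
          set r := childA adj n (PySem.Dict.getD ⟨adj⟩ c []) c (PySem.Set.add vis c) with hr
          have hmono : pvKeysLeft adj r.2 ≤ pvKeysLeft adj (PySem.Set.add vis c) := by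
            apply pv_keysLeft_mono
            intro x hx
            rw [hr]
            exact pv_mono adj n _ c (PySem.Set.add vis c) x hx
          rw [ih stack (min best r.1) r.2 (by omega)]
          have hA : childA adj (n + 1) (c :: cs) best vis =
              childA adj (n + 1) cs (min r.1 best) r.2 := by
            rw [childA, if_neg hc, goA, if_neg (by rw [hk]; decide)]
          rw [hA, min_comm best r.1]
        · -- child absent from adjLst: A's recursive call returns it at once
          rw [loopB, if_neg hc, if_neg hk, pv_ite_min]
          rw [ih stack (min c best) vis hf]
          have hA : childA adj (n + 1) (c :: cs) best vis =
              childA adj (n + 1) cs (min c best) vis := by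
            rw [childA, if_neg hc, goA, if_pos (by simp only [Bool.not_eq_true] at hk; exact hk)]
          rw [hA]

theorem pv_keysLeft_le_len (adj : List (String × List String)) (vis : List String) :
    pvKeysLeft adj vis ≤ adj.length := by
  unfold pvKeysLeft
  calc ((PySem.List.dedup (adj.map Prod.fst)).filter
          (fun k => !(PySem.Set.contains vis k))).length
      ≤ (PySem.List.dedup (adj.map Prod.fst)).length := List.length_filter_le _ _
    _ ≤ (adj.map Prod.fst).length := by
        rw [PySem.List.dedup_eq_ofList]
        exact PySem.Set.length_ofList_le _
    _ = adj.length := List.length_map ..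

-- ===== VERDICT (by name: the statement is the Claim_ definition above) =====
theorem dfsMin_spec : Claim_equal_dfsMin := by
  intro start adj vis _
  unfold Spec_dfsMin dfsMin dfsMin_alt
  by_cases hk : PySem.Dict.contains (⟨adj⟩ : PySem.Dict String (List String)) start = false
  · rw [if_pos hk, goA, if_pos hk]
  · rw [if_neg hk]
    have : adj.length + 2 = (adj.length + 1) + 1 := rfl
    rw [this, goA, if_neg hk]
    rw [pv_sim adj (adj.length + 1) _ [] start (PySem.Set.add vis start)
        (by have := pv_keysLeft_le_len adj (PySem.Set.add vis start); omega)]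
    rw [loopB]
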